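-- pv_equiv track=rewrite | github.com/alexxx-db/databricks-asset-bundles-examples | contrib/templates/data-engineering/template/{{.project_name}}/scripts/add_asset.py | _parse_passthrough_args
-- ===== SOURCE A (Python) =====
-- from typing import List, Literal
--
-- ALLOWED_PASSTHROUGH = frozenset({"--config", "--target"})
--
-- def _parse_passthrough_args(args: List[str]) -> List[str]:
--     """Parse argv for allowlisted options and their values. Prevents command injection."""
--     result = []
--     i = 0
--     while i < len(args):
--         arg = args[i]
--         if arg in ALLOWED_PASSTHROUGH:
--             result.append(arg)
--             i += 1
--             if i < len(args) and not args[i].startswith("-"):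
--                 result.append(args[i])
--                 i += 1
--         else:
--             i += 1
--     return result
-- ===== SOURCE B (Python) =====
-- from typing import List
--
-- ALLOWED_PASSTHROUGH = frozenset({"--config", "--target"})
--
-- def _parse_passthrough_args(args: List[str]) -> List[str]:
--     """Parse argv for allowlisted options and their values. Prevents command injection."""
--     result = []
--     expecting_value = False
--     for arg in args:
--         if expecting_value:
--             expecting_value = False
--             if not arg.startswith("-"):
--                 result.append(arg)
--                 continue
--         if arg in ALLOWED_PASSTHROUGH:
--             result.append(arg)
--             expecting_value = True
--     return result
-- ===== Notes on version B (the rewrite author's own statement) =====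
-- stated objective: simpler
-- what changed: Replaced the index-driven while loop (with explicit i += 1/+= 2 arithmetic and a bounds check for the lookahead) by a single for-each pass carrying an expecting_value flag that consumes an option's value, falling through to re-evaluate dash-prefixed tokens.
import Mathlib
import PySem

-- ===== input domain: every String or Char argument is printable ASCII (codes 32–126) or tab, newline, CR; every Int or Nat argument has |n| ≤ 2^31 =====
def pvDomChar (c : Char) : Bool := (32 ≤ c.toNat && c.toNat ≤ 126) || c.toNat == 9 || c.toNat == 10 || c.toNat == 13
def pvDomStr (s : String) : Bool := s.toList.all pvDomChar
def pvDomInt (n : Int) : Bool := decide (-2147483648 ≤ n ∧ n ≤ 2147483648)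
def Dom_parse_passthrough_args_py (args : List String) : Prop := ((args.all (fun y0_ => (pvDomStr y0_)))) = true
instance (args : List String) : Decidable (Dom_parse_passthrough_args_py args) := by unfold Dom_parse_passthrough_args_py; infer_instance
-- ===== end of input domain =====

-- B replaces A's index-driven while loop by a single for-each pass with an expecting_value flag (simpler decomposition, same O(n) cost).


-- ===== PORT A =====
-- ALLOWED_PASSTHROUGH = frozenset({"--config", "--target"})
def pvAllowed : List String := ["--config", "--target"]

-- the while loop: the cursor i over args is the remaining suffix; i += 1 drops one
-- element, the lookahead args[i] after an option is the head of the rest.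
def pvLoopA : List String → List String
  | [] => []
  | arg :: rest =>
    if arg ∈ pvAllowed then
      match rest with
      | [] => [arg]
      | b :: rest' =>
        if ¬ PySem.Str.startswith b "-" then arg :: b :: pvLoopA rest'
        else arg :: pvLoopA (b :: rest')
    else pvLoopA rest

def parse_passthrough_args_py (args : List String) : List String := pvLoopA args

-- ===== PORT B =====
-- the for-loop with the expecting_value flag threaded through the recursion
def pvLoopB : Bool → List String → List String
  | _, [] => []
  | expecting, arg :: rest =>
    if expecting ∧ ¬ PySem.Str.startswith arg "-" then arg :: pvLoopB false rest
    else if arg ∈ pvAllowed then arg :: pvLoopB true rest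
    else pvLoopB false rest

def parse_passthrough_args_py_alt (args : List String) : List String := pvLoopB false args

-- ===== PRECONDITION & SPEC =====
def Spec_parse_passthrough_args_py (args : List String) (out : List String) : Prop := out = parse_passthrough_args_py_alt args
instance (args : List String) (out : List String) : Decidable (Spec_parse_passthrough_args_py args out) := by unfold Spec_parse_passthrough_args_py; infer_instance

-- ===== CLAIM (what is proved, stated in full; the proofs are below) =====
def Claim_equal_parse_passthrough_args_py : Prop := ∀ (args : List String), Dom_parse_passthrough_args_py args → Spec_parse_passthrough_args_py args (parse_passthrough_args_py args)

-- ===== LEMMAS AND PROOFS =====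
theorem pvLoopA_eq_pvLoopB : ∀ (xs : List String), pvLoopA xs = pvLoopB false xs
  | [] => rfl
  | [arg] => by by_cases h : arg ∈ pvAllowed <;> simp [pvLoopA, pvLoopB, h]
  | arg :: b :: rest' => by
      by_cases h : arg ∈ pvAllowed
      · by_cases hb : PySem.Chars.startswith b.toList ['-']
        · have ih := pvLoopA_eq_pvLoopB (b :: rest')
          simp [pvLoopA, pvLoopB, h, hb] at ih ⊢
          exact ih
        · have ih := pvLoopA_eq_pvLoopB rest'
          simp [pvLoopA, pvLoopB, h, hb, ih]
      · have ih := pvLoopA_eq_pvLoopB (b :: rest')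
        simpa [pvLoopA, pvLoopB, h] using ih
termination_by xs => xs.length

-- ===== VERDICT (by name: the statement is the Claim_ definition above) =====
theorem parse_passthrough_args_py_spec : Claim_equal_parse_passthrough_args_py := by
  intro args _
  unfold Spec_parse_passthrough_args_py parse_passthrough_args_py parse_passthrough_args_py_alt
  exact pvLoopA_eq_pvLoopB args
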